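-- pv_equiv track=rewrite | github.com/luke-axt/zz_astpy_admin | script/ebay店铺授权.py | _find_header_index
-- ===== SOURCE A (Python) =====
-- from typing import List, Optional, Tuple
--
-- def _find_header_index(headers: List[str], accepted: set, fuzzy_keywords: Optional[List[str]] = None) -> Optional[int]:
--     for idx, col in enumerate(headers):
--         if col in accepted:
--             return idx
--     if fuzzy_keywords:
--         for idx, col in enumerate(headers):
--             if any(keyword in col for keyword in fuzzy_keywords):
--                 return idx
--     return None
-- ===== SOURCE B (Python) =====
-- from typing import List, Optional
--
-- def _find_header_index(headers: List[str], accepted: set, fuzzy_keywords: Optional[List[str]] = None) -> Optional[int]: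
--     fuzzy_idx = None
--     for idx, col in enumerate(headers):
--         if col in accepted:
--             return idx
--         if fuzzy_keywords and fuzzy_idx is None and any(k in col for k in fuzzy_keywords):
--             fuzzy_idx = idx
--     return fuzzy_idx
-- ===== Notes on version B (the rewrite author's own statement) =====
-- stated objective: alternative
-- what changed: Replaces A's two separate scans (exact pass, then a full fuzzy re-scan) with one pass over enumerate(headers) that returns immediately on an exact match and records only the first fuzzy candidate, returned after the loop.
import Mathlib
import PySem

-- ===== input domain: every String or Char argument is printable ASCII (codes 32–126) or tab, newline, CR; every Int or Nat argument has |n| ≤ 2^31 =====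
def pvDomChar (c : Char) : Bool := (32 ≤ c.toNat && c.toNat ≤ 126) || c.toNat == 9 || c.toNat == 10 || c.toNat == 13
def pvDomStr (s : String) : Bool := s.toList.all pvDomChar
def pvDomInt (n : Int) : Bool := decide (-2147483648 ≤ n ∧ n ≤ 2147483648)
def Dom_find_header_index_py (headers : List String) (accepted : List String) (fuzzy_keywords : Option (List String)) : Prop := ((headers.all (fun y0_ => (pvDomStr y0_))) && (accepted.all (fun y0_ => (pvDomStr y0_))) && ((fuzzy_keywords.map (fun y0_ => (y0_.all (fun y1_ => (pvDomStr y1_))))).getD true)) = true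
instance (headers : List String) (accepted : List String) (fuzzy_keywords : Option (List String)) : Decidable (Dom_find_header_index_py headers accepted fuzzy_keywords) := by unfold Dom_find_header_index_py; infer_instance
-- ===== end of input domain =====

-- B replaces A's two scans (exact pass then fuzzy re-scan) with one pass recording the first fuzzy candidate.
-- ===== PORT A =====
def pvA_exact (headers : List String) (accepted : List String) (i : Int) : Option Int :=
  match headers with
  | [] => none
  | c :: rest => if accepted.contains c then some i else pvA_exact rest accepted (i + 1)

def pvA_fuzzy (headers : List String) (kws : List String) (i : Int) : Option Int :=
  match headers with
  | [] => none
  | c :: rest => if kws.any (fun k => PySem.Str.isIn k c) then some i else pvA_fuzzy rest kws (i + 1)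

def find_header_index_py (headers : List String) (accepted : List String) (fuzzy_keywords : Option (List String)) : Option Int :=
  match pvA_exact headers accepted 0 with
  | some j => some j
  | none =>
    match fuzzy_keywords with
    | some kws => if kws ≠ [] then pvA_fuzzy headers kws 0 else none
    | none => none

-- ===== PORT B =====
def pvB_loop (headers : List String) (accepted : List String) (kws : List String) (i : Int) (fz : Option Int) : Option Int :=
  match headers with
  | [] => fz
  | c :: rest =>
    if accepted.contains c then some i
    else pvB_loop rest accepted kws (i + 1)
      (if fz.isNone && kws.any (fun k => PySem.Str.isIn k c) then some i else fz)

def find_header_index_py_alt (headers : List String) (accepted : List String) (fuzzy_keywords : Option (List String)) : Option Int :=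
  pvB_loop headers accepted (fuzzy_keywords.getD []) 0 none

-- ===== PRECONDITION & SPEC =====
def Spec_find_header_index_py (headers : List String) (accepted : List String) (fuzzy_keywords : Option (List String)) (out : Option Int) : Prop := out = find_header_index_py_alt headers accepted fuzzy_keywords
instance (headers : List String) (accepted : List String) (fuzzy_keywords : Option (List String)) (out : Option Int) : Decidable (Spec_find_header_index_py headers accepted fuzzy_keywords out) := by unfold Spec_find_header_index_py; infer_instance

-- ===== CLAIM =====
def Claim_equal_find_header_index_py : Prop := ∀ (headers : List String) (accepted : List String) (fuzzy_keywords : Option (List String)), Dom_find_header_index_py headers accepted fuzzy_keywords → Spec_find_header_index_py headers accepted fuzzy_keywords (find_header_index_py headers accepted fuzzy_keywords)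

-- ===== LEMMAS AND PROOFS =====
theorem pvB_loop_eq (accepted kws : List String) : ∀ (headers : List String) (i : Int) (fz : Option Int),
    pvB_loop headers accepted kws i fz =
      match pvA_exact headers accepted i with
      | some j => some j
      | none =>
        match fz with
        | some j => some j
        | none => pvA_fuzzy headers kws i := by
  intro headers
  induction headers with
  | nil => intro i fz; cases fz <;> simp [pvB_loop, pvA_exact, pvA_fuzzy]
  | cons c rest ih =>
    intro i fz
    by_cases hc : c ∈ accepted <;>
      by_cases hk : ∃ x ∈ kws, PySem.Chars.isIn x.toList c.toList = true <;>
      cases fz <;>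
      simp [pvB_loop, pvA_exact, pvA_fuzzy, ih, hc, hk]

theorem pvA_fuzzy_nil (headers : List String) (i : Int) : pvA_fuzzy headers [] i = none := by
  induction headers generalizing i with
  | nil => simp [pvA_fuzzy]
  | cons c rest ih => simp [pvA_fuzzy, ih]

-- ===== VERDICT =====
theorem find_header_index_py_spec : Claim_equal_find_header_index_py := by
  intro headers accepted fuzzy_keywords _
  unfold Spec_find_header_index_py find_header_index_py find_header_index_py_alt
  rw [pvB_loop_eq]
  cases hx : pvA_exact headers accepted 0 with
  | some j => simp
  | none =>
    cases fuzzy_keywords with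
    | none => simp [pvA_fuzzy_nil]
    | some kws =>
      cases kws with
      | nil => simp [pvA_fuzzy_nil]
      | cons k ks => simp
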